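-- pv_equiv track=rewrite | github.com/6loss0m/MHC_study | gzzjk159/Programmers/Find_program_master/arithmetic_operation.py | solution
-- ===== SOURCE A (Python) =====
-- def solution(arr):
--     minmax = [0, 0]
--     sum_value = 0
--     for idx in range(len(arr)-1, -1, -1):
--         if arr[idx] == '+':
--             continue
--         elif arr[idx] == '-':
--             tempmin, tempmax = minmax
--             minmax[0] = min(-(sum_value + tempmax), -sum_value+tempmin)
--             # -(sum + max):-가 식전체에 붙는 경우, -sum+min:-가 이전 -값 앞까지만 붙는 경우
--             minus_v = int(arr[idx+1])
--             minmax[1] = max(-(sum_value+tempmin), -minus_v+(sum_value-minus_v)+tempmax)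
--             # -(sum + min):-가 식전체에 붙는 경우, -v+(sum-v)+max:-가 바로 뒤의 값에만 붙는 경우
--             sum_value = 0
--         elif int(arr[idx]) >= 0:
--             sum_value += int(arr[idx])
--     minmax[1] += sum_value
--     return minmax[1]
-- ===== SOURCE B (Python) =====
-- def solution(arr):
--     # Group the expression into '+'-blocks separated by '-' tokens: b0 is the
--     # leading block's sum; every later block keeps (sum, first nonneg number).
--     # Negative number tokens are skipped, as in the original.
--     b0 = 0
--     blocks = []
--     cur = None
--     for tok in arr:
--         if tok == '-':
--             if cur is not None:
--                 blocks.append(cur)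
--             cur = (0, None)
--         elif tok != '+':
--             v = int(tok)
--             if v >= 0:
--                 if cur is None:
--                     b0 += v
--                 else:
--                     s, f = cur
--                     cur = (s + v, v if f is None else f)
--         # negative numbers are skipped
--     if cur is not None:
--         blocks.append(cur)
--     if not blocks:
--         return b0
--     # One block j is swallowed whole by its '-'; blocks before j lose only
--     # their first number twice; blocks after j count positively.
--     total = sum(b for b, _ in blocks)
--     best = None
--     pref = 0   # sum of (b_i - 2*v_i) over blocks already passed
--     seen = 0   # sum of b_i over blocks up to and including the current one
--     for b, f in blocks:
--         seen += b
--         cand = pref + (total - seen) - b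
--         best = cand if best is None else max(best, cand)
--         pref += b - 2 * (f if f is not None else 0)
--     return b0 + max(best, pref)
-- ===== Notes on version B (the rewrite author's own statement) =====
-- stated objective: alternative
-- what changed: A's backward min/max DP over the token list is replaced by a forward pass that groups the tokens into '-'-separated '+'-blocks (keeping each block's sum and first number) and then takes a single closed-form max over the position of the block that the parenthesized '-' swallows whole.
-- outside the precondition, e.g. on solution(['-', '-5']): A returns 10, B returns 0; on solution(['0', '-', '-1', '3']): A returns 5, B returns -3
import Mathlib
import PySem

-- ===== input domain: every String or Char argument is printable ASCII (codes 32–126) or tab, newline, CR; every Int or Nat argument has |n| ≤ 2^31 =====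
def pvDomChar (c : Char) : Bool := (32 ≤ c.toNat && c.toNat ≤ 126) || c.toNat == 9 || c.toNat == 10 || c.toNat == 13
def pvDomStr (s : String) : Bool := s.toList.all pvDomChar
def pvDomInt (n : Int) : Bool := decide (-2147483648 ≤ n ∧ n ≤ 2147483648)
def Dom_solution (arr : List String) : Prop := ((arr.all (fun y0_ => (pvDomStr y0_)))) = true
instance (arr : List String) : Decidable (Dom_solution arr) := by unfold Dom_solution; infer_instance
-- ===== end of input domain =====

-- B replaces A's backward min/max DP by grouping the tokens into '-'-separated
-- '+'-blocks and taking a single forward max over the cut position (alternative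
-- decomposition, same linear cost); equivalence is about return values only.

-- ===== PORT A =====
-- one step of A's backward loop; the Option is none exactly where the Python raises
def stepA (arr : List String) (st : Option (Int × Int × Int)) (idx : Int) :
    Option (Int × Int × Int) :=
  match st with
  | none => none
  | some (mn, mx, s) =>
    match PySem.List.pyGet? arr idx with
    | none => none
    | some tok =>
      if tok = "+" then some (mn, mx, s)
      else if tok = "-" then
        let mn' := min (-(s + mx)) (-s + mn)
        match PySem.List.pyGet? arr (idx + 1) with
        | none => none
        | some t2 =>
          match PySem.Int.ofStr? t2 with
          | none => none
          | some v => some (mn', max (-(s + mn)) (-v + (s - v) + mx), 0)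
      else
        match PySem.Int.ofStr? tok with
        | none => none
        | some n => if 0 ≤ n then some (mn, mx, s + n) else some (mn, mx, s)

def solution (arr : List String) : Int :=
  match (PySem.List.pyRange ((arr.length : Int) - 1) (-1) (-1)).foldl (stepA arr)
      (some (0, 0, 0)) with
  | some (_, mx, s) => mx + s
  | none => 0          -- the Python raised; unreachable under Pre_solution

-- ===== PORT B =====
-- one step of B's grouping loop: state (b0, finished blocks, current block)
def stepB (st : Int × List (Int × Option Int) × Option (Int × Option Int)) (tok : String) :
    Int × List (Int × Option Int) × Option (Int × Option Int) :=
  let (b0, blocks, cur) := st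
  if tok = "-" then
    (b0, (match cur with | some c => blocks ++ [c] | none => blocks), some (0, none))
  else if tok ≠ "+" then
    match PySem.Int.ofStr? tok with
    | none => st       -- int(tok) raises in Python; unreachable under Pre_solution
    | some v =>
      if 0 ≤ v then
        match cur with
        | none => (b0 + v, blocks, none)
        | some (s, f) => (b0, blocks, some (s + v, match f with | none => some v | some _ => f))
      else st
  else st

-- one step of B's closing max loop: state (best, pref, seen)
def stepC (total : Int) (acc : Option Int × Int × Int) (p : Int × Option Int) :
    Option Int × Int × Int :=
  let (best, pref, seen) := acc
  let seen' := seen + p.1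
  let cand := pref + (total - seen') - p.1
  ((match best with | none => some cand | some m => some (max m cand)),
   pref + p.1 - 2 * (match p.2 with | some w => w | none => 0), seen')

def solution_alt (arr : List String) : Int :=
  let st := arr.foldl stepB (0, [], none)
  let b0 := st.1
  let blocks := match st.2.2 with | some c => st.2.1 ++ [c] | none => st.2.1
  if blocks.length = 0 then b0
  else
    let total := (blocks.map (fun p => p.1)).sum
    let res := blocks.foldl (stepC total) (none, 0, 0)
    b0 + max ((res.1).getD 0) res.2.1   -- res.1 is some _ since blocks ≠ []

-- ===== PRECONDITION & SPEC =====
-- Pre_ excludes malformed expressions: operand tokens int() cannot parse, and any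
-- '-' not immediately followed by a token parsing to a nonnegative integer — there
-- A either raises (ValueError/IndexError) or returns an accidental value obtained
-- by reading a number token it had itself skipped as the subtrahend.
def Pre_solution (arr : List String) : Prop :=
  ∀ i, (h : i < arr.length) →
    (arr[i] = "+" ∨ arr[i] = "-" ∨ (PySem.Int.ofStr? arr[i]).isSome = true) ∧
    (arr[i] = "-" → 0 ≤ ((arr[i + 1]?.bind PySem.Int.ofStr?).getD (-1)))

instance (arr : List String) : Decidable (Pre_solution arr) := by
  unfold Pre_solution; infer_instance

def pvWitness_solution : List String := ["5", "-", "3", "+", "2", "-", "4"]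

def Spec_solution (arr : List String) (out : Int) : Prop := out = solution_alt arr
instance (arr : List String) (out : Int) : Decidable (Spec_solution arr out) := by
  unfold Spec_solution; infer_instance

-- ===== CLAIM (what is proved, stated in full; the proofs are below) =====
def Claim_equal_solution : Prop :=
  ∀ (arr : List String), Dom_solution arr → Pre_solution arr → Spec_solution arr (solution arr)

-- ===== LEMMAS AND PROOFS =====

-- proof-side view of A's loop: structural recursion from the left
def stepTok (tok : String) (next : Option String) (st : Option (Int × Int × Int)) :
    Option (Int × Int × Int) :=
  match st with
  | none => none
  | some (mn, mx, s) =>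
    if tok = "+" then some (mn, mx, s)
    else if tok = "-" then
      let mn' := min (-(s + mx)) (-s + mn)
      match next with
      | none => none
      | some t2 =>
        match PySem.Int.ofStr? t2 with
        | none => none
        | some v => some (mn', max (-(s + mn)) (-v + (s - v) + mx), 0)
    else
      match PySem.Int.ofStr? tok with
      | none => none
      | some n => if 0 ≤ n then some (mn, mx, s + n) else some (mn, mx, s)

def gA : List String → Option (Int × Int × Int)
  | [] => some (0, 0, 0)
  | t :: r => stepTok t r.head? (gA r)

-- first nonnegative parsed number of the leading block
def f0 : List String → Option Int
  | [] => none
  | t :: r =>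
    if t = "+" then f0 r
    else if t = "-" then none
    else match PySem.Int.ofStr? t with
      | some n => if 0 ≤ n then some n else f0 r
      | none => f0 r

-- block decomposition: (leading block sum, [(block sum, first number)])
def Dk : List String → Int × List (Int × Option Int)
  | [] => (0, [])
  | t :: r =>
    if t = "+" then Dk r
    else if t = "-" then (0, ((Dk r).1, f0 r) :: (Dk r).2)
    else match PySem.Int.ofStr? t with
      | some n => if 0 ≤ n then ((Dk r).1 + n, (Dk r).2) else Dk r
      | none => Dk r

def Sb (bs : List (Int × Option Int)) : Int := (bs.map Prod.fst).sum

def MX : List (Int × Option Int) → Int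
  | [] => 0
  | (b, v) :: bs => max (Sb bs - b) (b - 2 * (v.getD 0) + MX bs)

-- recursive form of the precondition
def PreL : List String → Prop
  | [] => True
  | t :: r =>
    ((t = "+" ∨ t = "-" ∨ (PySem.Int.ofStr? t).isSome = true) ∧
      (t = "-" → 0 ≤ ((r[0]?.bind PySem.Int.ofStr?).getD (-1)))) ∧ PreL r

theorem Pre_to_PreL : ∀ arr : List String, Pre_solution arr → PreL arr := by
  intro arr
  induction arr with
  | nil => intro _; trivial
  | cons t r ih =>
    intro h
    refine ⟨?_, ih ?_⟩
    · have h0 := h 0 (by simp)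
      simpa using h0
    · intro i hi
      have := h (i + 1) (by simpa using Nat.succ_lt_succ hi)
      simpa using this

-- step shift: indices ≥ 1 into (t :: xs) are indices into xs
theorem pyGet?_cons_shift {α : Type} (x : α) (xs : List α) (i : Int) (hi : 1 ≤ i) :
    PySem.List.pyGet? (x :: xs) i = PySem.List.pyGet? xs (i - 1) := by
  rw [PySem.List.pyGet?_of_nonneg _ (show (0:Int) ≤ i by omega),
    PySem.List.pyGet?_of_nonneg _ (show (0:Int) ≤ i - 1 by omega)]
  have h : i.toNat = (i - 1).toNat + 1 := by omega
  rw [h]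
  simp

theorem stepA_shift (t : String) (xs : List String) (st : Option (Int × Int × Int))
    (i : Int) (hi : 1 ≤ i) : stepA (t :: xs) st i = stepA xs st (i - 1) := by
  unfold stepA
  rw [pyGet?_cons_shift t xs i hi, pyGet?_cons_shift t xs (i + 1) (by omega)]
  have h : i + 1 - 1 = i - 1 + 1 := by omega
  rw [h]

theorem shift_fold (t : String) (xs : List String) :
    ∀ (l : List Int) (st : Option (Int × Int × Int)), (∀ i ∈ l, 1 ≤ i) →
      l.foldl (stepA (t :: xs)) st = (l.map (· - 1)).foldl (stepA xs) st := by
  intro l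
  induction l with
  | nil => intro st _; rfl
  | cons i l' ih =>
    intro st hmem
    simp only [List.foldl_cons, List.map_cons]
    rw [stepA_shift t xs st i (hmem i (by simp))]
    exact ih _ (fun j hj => hmem j (by simp [hj]))

theorem range_shift (a : Int) :
    (PySem.List.pyRange a 0 (-1)).map (· - 1) = PySem.List.pyRange (a - 1) (-1) (-1) := by
  rw [PySem.List.pyRange_neg_one, PySem.List.pyRange_neg_one, List.map_map]
  have h : (a - 0).toNat = (a - 1 - -1).toNat := by omega
  rw [h]
  apply List.map_congr_left
  intro k _
  simp
  omega

theorem range_split (n : Int) (hn : 0 ≤ n) :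
    PySem.List.pyRange n (-1) (-1) = PySem.List.pyRange n 0 (-1) ++ [0] := by
  rw [PySem.List.pyRange_neg_one_eq_reverse, PySem.List.pyRange_neg_one_eq_reverse]
  rw [show (-1 : Int) + 1 = 0 by ring, show (0 : Int) + 1 = 1 by ring]
  rw [PySem.List.pyRange_one_cons (show (0:Int) < n + 1 by omega)]
  rw [show (0 : Int) + 1 = 1 by ring]
  simp

theorem foldA_eq_gA : ∀ arr : List String,
    (PySem.List.pyRange ((arr.length : Int) - 1) (-1) (-1)).foldl (stepA arr)
      (some (0, 0, 0)) = gA arr := by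
  intro arr
  induction arr with
  | nil =>
    rw [PySem.List.pyRange_neg_one_eq_nil (by simp)]
    rfl
  | cons t xs ih =>
    have hlen : ((t :: xs).length : Int) - 1 = (xs.length : Int) := by simp
    rw [hlen, range_split _ (by positivity), List.foldl_append]
    rw [shift_fold t xs (PySem.List.pyRange (xs.length : Int) 0 (-1)) _ (fun i hi => by
      rw [PySem.List.mem_pyRange_neg_one] at hi; omega)]
    rw [range_shift, ih]
    show stepA (t :: xs) (gA xs) 0 = gA (t :: xs)
    have hg : gA (t :: xs) = stepTok t xs.head? (gA xs) := rfl
    rw [hg]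
    unfold stepA stepTok
    rw [show (0 : Int) + 1 = 1 by ring, pyGet?_cons_shift t xs 1 (le_refl 1)]
    simp only [PySem.List.pyGet?_zero, List.head?_eq_getElem?, List.getElem?_cons_zero,
      show (1 : Int) - 1 = 0 by ring]

theorem f0_nonneg : ∀ l : List String, 0 ≤ (f0 l).getD 0 := by
  intro l
  induction l with
  | nil => simp [f0]
  | cons t r ih =>
    unfold f0
    split_ifs with h1 h2
    · exact ih
    · simp
    · cases hv : PySem.Int.ofStr? t with
      | none => simpa using ih
      | some n =>
        simp only []
        split_ifs with hn
        · simpa using hn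
        · simpa using ih

theorem Dk_nonneg : ∀ l : List String,
    0 ≤ (Dk l).1 ∧ ∀ p ∈ (Dk l).2, 0 ≤ p.1 ∧ 0 ≤ p.2.getD 0 := by
  intro l
  induction l with
  | nil => simp [Dk]
  | cons t r ih =>
    unfold Dk
    split_ifs with h1 h2
    · exact ih
    · refine ⟨le_refl 0, ?_⟩
      intro p hp
      rcases List.mem_cons.mp hp with h | h
      · subst h; exact ⟨ih.1, f0_nonneg r⟩
      · exact ih.2 p h
    · cases hv : PySem.Int.ofStr? t with
      | none => simpa using ih
      | some n =>
        simp only []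
        split_ifs with hn
        · exact ⟨by omega, ih.2⟩
        · exact ih

theorem Sb_cons (b : Int) (v : Option Int) (bs : List (Int × Option Int)) :
    Sb ((b, v) :: bs) = b + Sb bs := by simp [Sb]

theorem Sb_nonneg (bs : List (Int × Option Int)) (h : ∀ p ∈ bs, 0 ≤ p.1 ∧ 0 ≤ p.2.getD 0) :
    0 ≤ Sb bs := by
  induction bs with
  | nil => simp [Sb]
  | cons p tl ih =>
    have := h p (by simp)
    have h2 := ih (fun q hq => h q (by simp [hq]))
    cases p with
    | mk b v => rw [Sb_cons]; omega

theorem MX_le_Sb (bs : List (Int × Option Int)) (h : ∀ p ∈ bs, 0 ≤ p.1 ∧ 0 ≤ p.2.getD 0) :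
    MX bs ≤ Sb bs := by
  induction bs with
  | nil => simp [MX, Sb]
  | cons p tl ih =>
    have hp := h p (by simp)
    have h2 := ih (fun q hq => h q (by simp [hq]))
    cases p with
    | mk b v =>
      have hp' : 0 ≤ b ∧ 0 ≤ v.getD 0 := hp
      rw [Sb_cons]
      unfold MX
      omega

theorem MX_cons (b : Int) (v : Option Int) (bs : List (Int × Option Int)) :
    MX ((b, v) :: bs) = max (Sb bs - b) (b - 2 * v.getD 0 + MX bs) := rfl

theorem ofStr?_plus : PySem.Int.ofStr? "+" = none := by decide
theorem ofStr?_minus : PySem.Int.ofStr? "-" = none := by decide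

theorem stepTok_some (tok : String) (next : Option String) (mn mx s : Int) :
    stepTok tok next (some (mn, mx, s)) =
      (if tok = "+" then some (mn, mx, s)
       else if tok = "-" then
         match next with
         | none => none
         | some t2 =>
           match PySem.Int.ofStr? t2 with
           | none => none
           | some v =>
             some (min (-(s + mx)) (-s + mn), max (-(s + mn)) (-v + (s - v) + mx), 0)
       else match PySem.Int.ofStr? tok with
         | none => none
         | some n => if 0 ≤ n then some (mn, mx, s + n) else some (mn, mx, s)) := rfl

theorem gA_char : ∀ l : List String, PreL l →
    gA l = some (-(Sb (Dk l).2), MX (Dk l).2, (Dk l).1) := by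
  intro l
  induction l with
  | nil => simp [gA, Dk, Sb, MX]
  | cons t r ih =>
    intro hpre
    obtain ⟨⟨htok, hminus⟩, hr⟩ := hpre
    have hg : gA (t :: r) = stepTok t r.head? (gA r) := rfl
    rw [hg, ih hr, stepTok_some]
    by_cases h1 : t = "+"
    · have hDk : Dk (t :: r) = Dk r := by
        conv_lhs => unfold Dk
        exact if_pos h1
      rw [if_pos h1, hDk]
    · rw [if_neg h1]
      by_cases h2 : t = "-"
      · rw [if_pos h2]
        have hm := hminus h2
        cases r with
        | nil => simp at hm
        | cons t2 r' =>
          simp only [List.getElem?_cons_zero, Option.bind_some] at hm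
          cases hv : PySem.Int.ofStr? t2 with
          | none => rw [hv] at hm; simp at hm
          | some v =>
            rw [hv] at hm
            simp only [Option.getD_some] at hm
            have ht2p : t2 ≠ "+" := by intro he; rw [he, ofStr?_plus] at hv; cases hv
            have ht2m : t2 ≠ "-" := by intro he; rw [he, ofStr?_minus] at hv; cases hv
            have hf0 : f0 (t2 :: r') = some v := by
              conv_lhs => unfold f0
              rw [if_neg ht2p, if_neg ht2m, hv]
              simp [hm]
            have hDk : Dk (t :: t2 :: r') =
                (0, ((Dk (t2 :: r')).1, some v) :: (Dk (t2 :: r')).2) := by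
              conv_lhs => unfold Dk
              rw [if_neg h1, if_pos h2, hf0]
            rw [hDk]
            simp only [List.head?_cons, hv]
            obtain ⟨hb0, hbs⟩ := Dk_nonneg (t2 :: r')
            have hS := Sb_nonneg _ hbs
            have hMS := MX_le_Sb _ hbs
            rw [Sb_cons, MX_cons]
            simp only [Option.getD_some, Option.some.injEq, Prod.mk.injEq, and_true]
            exact ⟨by omega, by omega⟩
      · rw [if_neg h2]
        have hs : (PySem.Int.ofStr? t).isSome = true := by
          rcases htok with h | h | h
          · exact absurd h h1
          · exact absurd h h2
          · exact h
        cases hv : PySem.Int.ofStr? t with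
        | none => rw [hv] at hs; cases hs
        | some n =>
          have hDk : Dk (t :: r) =
              (if 0 ≤ n then ((Dk r).1 + n, (Dk r).2) else Dk r) := by
            conv_lhs => unfold Dk
            rw [if_neg h1, if_neg h2, hv]
          rw [hDk]
          split_ifs with hn <;> simp [hn]

-- B side: block extraction of the phase-1 fold
def finB (st : Int × List (Int × Option Int) × Option (Int × Option Int)) :
    Int × List (Int × Option Int) :=
  (st.1, match st.2.2 with | none => st.2.1 | some c => st.2.1 ++ [c])

def mergeF (f : Option Int) (l : List String) : Option Int :=
  match f with | some _ => f | none => f0 l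

theorem foldB_char : ∀ (l : List String) (b0 : Int) (done : List (Int × Option Int))
    (cur : Option (Int × Option Int)),
    finB (l.foldl stepB (b0, done, cur)) =
      (match cur with
       | none => (b0 + (Dk l).1, done ++ (Dk l).2)
       | some c => (b0, done ++ (c.1 + (Dk l).1, mergeF c.2 l) :: (Dk l).2)) := by
  intro l
  induction l with
  | nil =>
    intro b0 done cur
    cases cur with
    | none => simp [finB, Dk]
    | some c =>
      cases c with
      | mk s f => cases f <;> simp [finB, Dk, mergeF, f0]
  | cons t r ih =>
    intro b0 done cur
    rw [List.foldl_cons]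
    by_cases h1 : t = "-"
    · have hstep : stepB (b0, done, cur) t =
          (b0, (match cur with | some c => done ++ [c] | none => done), some (0, none)) := by
        simp [stepB, h1]
      rw [hstep, ih]
      have hDk : Dk (t :: r) = (0, ((Dk r).1, f0 r) :: (Dk r).2) := by
        conv_lhs => unfold Dk
        rw [if_neg (show t ≠ "+" by simp [h1]), if_pos h1]
      rw [hDk]
      cases cur with
      | none => simp [mergeF]
      | some c =>
        cases c with
        | mk s f =>
          cases f with
          | none =>
            have hf : f0 (t :: r) = none := by
              conv_lhs => unfold f0
              rw [if_neg (show t ≠ "+" by simp [h1])]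
              exact if_pos h1
            simp [mergeF, hf]
          | some w => simp [mergeF]
    · by_cases h2 : t = "+"
      · have hstep : stepB (b0, done, cur) t = (b0, done, cur) := by
          simp [stepB, h2]
        rw [hstep, ih]
        have hDk : Dk (t :: r) = Dk r := by
          conv_lhs => unfold Dk
          exact if_pos h2
        have hf0 : f0 (t :: r) = f0 r := by
          conv_lhs => unfold f0
          exact if_pos h2
        rw [hDk]
        cases cur with
        | none => rfl
        | some c =>
          cases c with
          | mk s f =>
            cases f with
            | none => simp [mergeF, hf0]
            | some w => rfl
      · cases hv : PySem.Int.ofStr? t with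
        | none =>
          have hstep : stepB (b0, done, cur) t = (b0, done, cur) := by
            simp [stepB, h1, h2, hv]
          rw [hstep, ih]
          have hDk : Dk (t :: r) = Dk r := by
            conv_lhs => unfold Dk
            rw [if_neg h2, if_neg h1, hv]
          have hf0 : f0 (t :: r) = f0 r := by
            conv_lhs => unfold f0
            rw [if_neg h2, if_neg h1, hv]
          rw [hDk]
          cases cur with
          | none => rfl
          | some c =>
            cases c with
            | mk s f =>
              cases f with
              | none => simp [mergeF, hf0]
              | some w => rfl
        | some n =>
          by_cases hn : 0 ≤ n
          · have hDk : Dk (t :: r) = ((Dk r).1 + n, (Dk r).2) := by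
              conv_lhs => unfold Dk
              rw [if_neg h2, if_neg h1, hv]
              simp [hn]
            have hf0 : f0 (t :: r) = some n := by
              conv_lhs => unfold f0
              rw [if_neg h2, if_neg h1, hv]
              simp [hn]
            cases cur with
            | none =>
              have hstep : stepB (b0, done, none) t = (b0 + n, done, none) := by
                simp [stepB, h1, h2, hv, hn]
              rw [hstep, ih, hDk]
              simp only []
              rw [show b0 + n + (Dk r).1 = b0 + ((Dk r).1 + n) by ring]
            | some c =>
              cases c with
              | mk s f =>
                have hstep : stepB (b0, done, some (s, f)) t =
                    (b0, done, some (s + n, match f with | none => some n | some _ => f)) := by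
                  simp [stepB, h1, h2, hv, hn]
                rw [hstep, ih, hDk]
                cases f with
                | none =>
                  simp only [mergeF, hf0]
                  rw [show s + n + (Dk r).1 = s + ((Dk r).1 + n) by ring]
                | some w =>
                  simp only [mergeF]
                  rw [show s + n + (Dk r).1 = s + ((Dk r).1 + n) by ring]
          · have hstep : stepB (b0, done, cur) t = (b0, done, cur) := by
              simp [stepB, h1, h2, hv, hn]
            rw [hstep, ih]
            have hDk : Dk (t :: r) = Dk r := by
              conv_lhs => unfold Dk
              rw [if_neg h2, if_neg h1, hv]
              simp [hn]
            have hf0 : f0 (t :: r) = f0 r := by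
              conv_lhs => unfold f0
              rw [if_neg h2, if_neg h1, hv]
              simp [hn]
            rw [hDk]
            cases cur with
            | none => rfl
            | some c =>
              cases c with
              | mk s f =>
                cases f with
                | none => simp [mergeF, hf0]
                | some w => rfl

theorem loopB : ∀ (bs : List (Int × Option Int)) (total pref seen m : Int),
    total - seen = Sb bs →
    max (((bs.foldl (stepC total) (some m, pref, seen)).1).getD 0)
        (bs.foldl (stepC total) (some m, pref, seen)).2.1 = max m (pref + MX bs) := by
  intro bs
  induction bs with
  | nil => intro total pref seen m h; simp [MX]
  | cons p tl ih =>
    intro total pref seen m h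
    cases p with
    | mk b v =>
      rw [Sb_cons] at h
      rw [List.foldl_cons]
      have hstep : stepC total (some m, pref, seen) (b, v) =
          (some (max m (pref + (total - (seen + b)) - b)), pref + b - 2 * v.getD 0,
            seen + b) := by
        simp [stepC]
        cases v <;> rfl
      rw [hstep, ih _ _ _ _ (by omega)]
      have hc : pref + (total - (seen + b)) - b = pref + (Sb tl - b) := by omega
      rw [hc, MX_cons]
      omega

theorem altB_char : ∀ arr : List String,
    solution_alt arr = (Dk arr).1 + MX (Dk arr).2 := by
  intro arr
  have h := foldB_char arr 0 [] none
  simp only [List.nil_append, zero_add] at h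
  unfold solution_alt
  have h1 : (arr.foldl stepB (0, [], none)).1 = (Dk arr).1 := by
    have := congrArg Prod.fst h
    simpa [finB] using this
  have h2 : (match (arr.foldl stepB (0, [], none)).2.2 with
      | some c => (arr.foldl stepB (0, [], none)).2.1 ++ [c]
      | none => (arr.foldl stepB (0, [], none)).2.1) = (Dk arr).2 := by
    have := congrArg Prod.snd h
    cases hc : (arr.foldl stepB (0, [], none)).2.2 with
    | none => simpa [finB, hc] using this
    | some c => simpa [finB, hc] using this
  simp only [h2, h1]
  cases hbs : (Dk arr).2 with
  | nil => simp [MX]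
  | cons p tl =>
    cases p with
    | mk b v =>
      simp only [List.length_cons, Nat.add_one_ne_zero, if_false, List.foldl_cons]
      have htot : (((b, v) :: tl).map (fun p => p.1)).sum = Sb ((b, v) :: tl) := rfl
      have hstep : stepC (Sb ((b, v) :: tl)) (none, 0, 0) (b, v) =
          (some (0 + (Sb ((b, v) :: tl) - (0 + b)) - b), 0 + b - 2 * v.getD 0, 0 + b) := by
        simp [stepC]
        cases v <;> rfl
      rw [htot, hstep, loopB tl _ _ _ _ (by rw [Sb_cons]; omega)]
      rw [Sb_cons, MX_cons]
      omega

-- ===== VERDICT (by name: the statement is the Claim_ definition above) =====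
theorem solution_spec : Claim_equal_solution := by
  unfold Claim_equal_solution Spec_solution
  intro arr _ hpre
  have hg := gA_char arr (Pre_to_PreL arr hpre)
  unfold solution
  rw [foldA_eq_gA, hg, altB_char]
  simp only []
  omega
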